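-- pv_equiv track=rewrite | github.com/astrolado/CrisprCAS9-RNA-Guide | genome_store.py | _count_mismatches
-- ===== SOURCE A (Python) =====
-- def _count_mismatches(a: str, b: str, max_mismatches: int | None = None) -> int:
--     mismatches = 0
--     for x, y in zip(a, b):
--         if x != y:
--             mismatches += 1
--             if max_mismatches is not None and mismatches > max_mismatches:
--                 return mismatches
--     return mismatches
-- ===== SOURCE B (Python) =====
-- def _count_mismatches(a: str, b: str, max_mismatches: int | None = None) -> int:
--     total = sum(x != y for x, y in zip(a, b))
--     if max_mismatches is None:
--         return total
--     return min(total, max_mismatches + 1)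
-- ===== Notes on version B (the rewrite author's own statement) =====
-- stated objective: simpler
-- what changed: Replaced the incremental early-exit loop by one aggregate mismatch count over zip followed by the clamp min(total, max_mismatches+1); Pre_ restricts to the natural domain of non-negative (or absent) thresholds, since a negative mismatch threshold is meaningless and neither program's value there is specified.
-- outside the precondition, e.g. on _count_mismatches('ab', 'cd', -2): A returns 1, B returns -1; on _count_mismatches('ab', 'ab', -2): A returns 0, B returns -1
import Mathlib
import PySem

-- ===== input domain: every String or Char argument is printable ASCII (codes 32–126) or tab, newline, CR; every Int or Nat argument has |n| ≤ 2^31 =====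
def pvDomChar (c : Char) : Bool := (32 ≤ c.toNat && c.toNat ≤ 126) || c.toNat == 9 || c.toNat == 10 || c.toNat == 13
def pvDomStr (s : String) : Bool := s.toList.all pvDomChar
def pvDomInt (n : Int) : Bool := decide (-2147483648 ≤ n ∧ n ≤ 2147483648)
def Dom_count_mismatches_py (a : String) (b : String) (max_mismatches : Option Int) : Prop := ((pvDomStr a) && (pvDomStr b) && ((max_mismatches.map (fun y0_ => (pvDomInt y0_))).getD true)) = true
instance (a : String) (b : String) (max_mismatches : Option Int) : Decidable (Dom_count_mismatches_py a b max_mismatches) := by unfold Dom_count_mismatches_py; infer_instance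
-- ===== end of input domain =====

-- B replaces A's incremental early-exit loop by an aggregate mismatch count plus the
-- clamp min(total, max_mismatches+1) (simpler); on the natural domain (threshold absent
-- or non-negative, see Pre_) the return values agree.

-- ===== PORT A =====
-- loop over zip(a,b) with accumulator `mismatches` and early return when the threshold is exceeded
def cmLoopA (xs ys : List Char) (max_mismatches : Option Int) (mismatches : Int) : Int :=
  match xs, ys with
  | x :: xs', y :: ys' =>
    if x ≠ y then
      let m := mismatches + 1
      match max_mismatches with
      | some mm => if m > mm then m else cmLoopA xs' ys' max_mismatches m
      | none => cmLoopA xs' ys' max_mismatches m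
    else cmLoopA xs' ys' max_mismatches mismatches
  | _, _ => mismatches

def count_mismatches_py (a : String) (b : String) (max_mismatches : Option Int) : Int :=
  cmLoopA a.toList b.toList max_mismatches 0

-- ===== PORT B =====
-- total = sum(x != y for x, y in zip(a, b)); then clamp at max_mismatches + 1
def count_mismatches_py_alt (a : String) (b : String) (max_mismatches : Option Int) : Int :=
  let total := ((a.toList.zip b.toList).map (fun p => if p.1 ≠ p.2 then (1 : Int) else 0)).sum
  match max_mismatches with
  | none => total
  | some mm => min total (mm + 1)

-- ===== PRECONDITION & SPEC =====
-- Pre_ restricts to the function's natural domain: the mismatch threshold, when given, is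
-- non-negative. A negative threshold is a meaningless parameter value no caller would
-- specify; A and B return different, equally unspecified values there (see claim cites).
def Pre_count_mismatches_py (a : String) (b : String) (max_mismatches : Option Int) : Prop :=
  ∀ mm, max_mismatches = some mm → 0 ≤ mm
instance (a : String) (b : String) (max_mismatches : Option Int) : Decidable (Pre_count_mismatches_py a b max_mismatches) := by unfold Pre_count_mismatches_py; infer_instance

def pvWitness_count_mismatches_py : String × String × Option Int := ("ACGT", "AGGA", some 2)

def Spec_count_mismatches_py (a : String) (b : String) (max_mismatches : Option Int) (out : Int) : Prop := out = count_mismatches_py_alt a b max_mismatches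
instance (a : String) (b : String) (max_mismatches : Option Int) (out : Int) : Decidable (Spec_count_mismatches_py a b max_mismatches out) := by unfold Spec_count_mismatches_py; infer_instance

-- ===== CLAIM (what is proved, stated in full; the proofs are below) =====
def Claim_equal_count_mismatches_py : Prop := ∀ (a : String) (b : String) (max_mismatches : Option Int), Dom_count_mismatches_py a b max_mismatches → Pre_count_mismatches_py a b max_mismatches → Spec_count_mismatches_py a b max_mismatches (count_mismatches_py a b max_mismatches)

-- ===== LEMMAS AND PROOFS =====
def mismTotal (xs ys : List Char) : Int :=
  ((xs.zip ys).map (fun p => if p.1 ≠ p.2 then (1 : Int) else 0)).sum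

theorem mismTotal_nil (ys : List Char) : mismTotal [] ys = 0 := by
  simp [mismTotal]

theorem mismTotal_nil_right (xs : List Char) : mismTotal xs [] = 0 := by
  simp [mismTotal]

theorem mismTotal_cons (x y : Char) (xs ys : List Char) :
    mismTotal (x :: xs) (y :: ys) = (if x ≠ y then 1 else 0) + mismTotal xs ys := by
  simp [mismTotal]

theorem mismTotal_nonneg (xs ys : List Char) : 0 ≤ mismTotal xs ys := by
  induction xs generalizing ys with
  | nil => simp [mismTotal_nil]
  | cons x xs ih =>
    cases ys with
    | nil => simp [mismTotal_nil_right]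
    | cons y ys =>
      have := ih ys
      rw [mismTotal_cons]
      split <;> omega

theorem cmLoopA_none (xs ys : List Char) (acc : Int) :
    cmLoopA xs ys none acc = acc + mismTotal xs ys := by
  induction xs generalizing ys acc with
  | nil => simp [cmLoopA, mismTotal_nil]
  | cons x xs ih =>
    cases ys with
    | nil => simp [cmLoopA, mismTotal_nil_right]
    | cons y ys =>
      rw [mismTotal_cons]
      simp only [cmLoopA]
      by_cases hxy : x = y
      · simp only [if_neg (show ¬ (x ≠ y) from fun h => h hxy)]
        rw [ih ys acc]; omega
      · simp only [if_pos hxy]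
        rw [ih ys (acc + 1)]; omega

theorem cmLoopA_some (xs ys : List Char) (mm acc : Int)
    (h0 : 0 ≤ acc) (h1 : acc ≤ mm) (hmm : 0 ≤ mm) :
    cmLoopA xs ys (some mm) acc = min (acc + mismTotal xs ys) (mm + 1) := by
  induction xs generalizing ys acc with
  | nil => rw [mismTotal_nil]; simp only [cmLoopA]; omega
  | cons x xs ih =>
    cases ys with
    | nil => rw [mismTotal_nil_right]; simp only [cmLoopA]; omega
    | cons y ys =>
      have hnn := mismTotal_nonneg xs ys
      rw [mismTotal_cons]
      simp only [cmLoopA]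
      by_cases hxy : x = y
      · simp only [if_neg (show ¬ (x ≠ y) from fun h => h hxy)]
        rw [ih ys acc h0 h1]; omega
      · simp only [if_pos hxy]
        by_cases hgt : acc + 1 > mm
        · rw [if_pos hgt, min_def]; split_ifs <;> omega
        · rw [if_neg hgt, ih ys (acc + 1) (by omega) (by omega)]; omega

-- ===== VERDICT (by name: the statement is the Claim_ definition above) =====
theorem count_mismatches_py_spec : Claim_equal_count_mismatches_py := by
  intro a b m _ hpre
  unfold Spec_count_mismatches_py count_mismatches_py count_mismatches_py_alt
  cases m with
  | none =>
    rw [cmLoopA_none a.toList b.toList 0]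
    simp [mismTotal]
  | some mm =>
    have hmm : 0 ≤ mm := hpre mm rfl
    rw [cmLoopA_some a.toList b.toList mm 0 le_rfl hmm hmm]
    simp [mismTotal]
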